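-- pv_equiv track=rewrite | github.com/ourcookiestuff/J-zyki_Skryptowe | PYTHON01/python01.py | process_record
-- ===== SOURCE A (Python) =====
-- SCORE_LETTERS = "parallelism"
--
-- def process_record(record):
--     text = record["text"]
--     words = text.split()
--     word_count = len(words)
--     unique_letters = len(set(text.replace(" ", "")))
--     score = sum(text.count(c) for c in SCORE_LETTERS)
--
--     return {
--         "word_count": word_count,
--         "unique_letters": unique_letters,
--         "score": score,
--     }
-- ===== SOURCE B (Python) =====
-- # Weight table: multiplicity of each letter in "parallelism".
-- WEIGHTS = {'p': 1, 'a': 2, 'r': 1, 'l': 3, 'e': 1, 'i': 1, 's': 1, 'm': 1}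
--
-- def process_record(record):
--     text = record["text"]
--     word_count = 0
--     in_word = False
--     seen = set()
--     score = 0
--     for c in text:
--         if c.isspace():
--             in_word = False
--         else:
--             if not in_word:
--                 word_count += 1
--             in_word = True
--         if c != ' ':
--             seen.add(c)
--         score += WEIGHTS.get(c, 0)
--     return {
--         "word_count": word_count,
--         "unique_letters": len(seen),
--         "score": score,
--     }
-- ===== Notes on version B (the rewrite author's own statement) =====
-- stated objective: alternative
-- what changed: B makes a single fused left-to-right pass over the text with one accumulator (word-boundary counter, seen-set, running weighted score from a precomputed weight table) instead of A's four staged passes: split(), replace+set, and 11 separate text.count scans.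
-- outside the precondition, e.g. on process_record({}): A raises KeyError, B raises KeyError
import Mathlib
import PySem

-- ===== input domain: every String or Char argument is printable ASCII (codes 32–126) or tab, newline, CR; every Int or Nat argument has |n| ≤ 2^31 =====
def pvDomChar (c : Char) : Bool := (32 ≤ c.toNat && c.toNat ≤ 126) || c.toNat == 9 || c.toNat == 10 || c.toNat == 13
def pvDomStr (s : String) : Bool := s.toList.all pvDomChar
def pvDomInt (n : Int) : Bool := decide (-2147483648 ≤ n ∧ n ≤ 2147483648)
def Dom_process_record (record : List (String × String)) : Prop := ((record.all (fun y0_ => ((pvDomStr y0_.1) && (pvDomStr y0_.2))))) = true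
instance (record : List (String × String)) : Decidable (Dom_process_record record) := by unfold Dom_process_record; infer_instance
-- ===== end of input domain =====

-- B fuses A's four staged passes (split, replace+set, 11 count scans) into a single
-- left-to-right pass over the text with one accumulator (objective: alternative single-pass algorithm).

def SCORE_LETTERS : String := "parallelism"

-- ===== PORT A =====
def process_record (record : List (String × String)) : List (String × Int) :=
  -- record["text"]: KeyError when the key is missing; [] stands for the raise, excluded by Pre_
  match record.lookup "text" with
  | none => []
  | some text =>
  let words := PySem.Str.split₀ text
  let word_count : Int := words.length
  let unique_letters : Int := (PySem.Set.ofList (PySem.Str.replace text " " "").toList).length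
  let score : Int := (SCORE_LETTERS.toList.map (fun c => (PySem.Str.count text (String.ofList [c]) : Int))).sum
  [("word_count", word_count), ("unique_letters", unique_letters), ("score", score)]

-- ===== PORT B =====
-- WEIGHTS = {'p':1,'a':2,'r':1,'l':3,'e':1,'i':1,'s':1,'m':1}
def PR_WEIGHTS : PySem.Dict Char Int :=
  PySem.Dict.ofList [('p', 1), ('a', 2), ('r', 1), ('l', 3), ('e', 1), ('i', 1), ('s', 1), ('m', 1)]

def process_record_alt (record : List (String × String)) : List (String × Int) :=
  -- record["text"]: KeyError when the key is missing; [] stands for the raise, excluded by Pre_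
  match record.lookup "text" with
  | none => []
  | some text =>
  -- one pass: state = ((word_count, in_word), (seen, score))
  let st := text.toList.foldl
    (fun (st : (Int × Bool) × (PySem.Set Char × Int)) c =>
      ((if PySem.Chars.isspace c then (st.1.1, false)
        else (if st.1.2 then st.1.1 else st.1.1 + 1, true)),
       ((if c ≠ ' ' then PySem.Set.add st.2.1 c else st.2.1),
        st.2.2 + PySem.Dict.getD PR_WEIGHTS c 0)))
    ((0, false), ([], 0))
  [("word_count", st.1.1), ("unique_letters", (st.2.1.length : Int)), ("score", st.2.2)]

-- ===== PRECONDITION & SPEC =====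
-- Pre_ excludes exactly the inputs where A raises KeyError: records without a "text" key.
def Pre_process_record (record : List (String × String)) : Prop :=
  (record.lookup "text").isSome = true
instance (record : List (String × String)) : Decidable (Pre_process_record record) := by unfold Pre_process_record; infer_instance
def pvWitness_process_record : (List (String × String)) := [("text", "a parallel ball")]

def Spec_process_record (record : List (String × String)) (out : List (String × Int)) : Prop := out = process_record_alt record
instance (record : List (String × String)) (out : List (String × Int)) : Decidable (Spec_process_record record out) := by unfold Spec_process_record; infer_instance

-- ===== CLAIM (what is proved, stated in full; the proofs are below) =====
def Claim_equal_process_record : Prop := ∀ (record : List (String × String)), Dom_process_record record → Pre_process_record record → Spec_process_record record (process_record record)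

-- ===== LEMMAS AND PROOFS =====

-- number of word starts in l, given whether we are currently inside a word
def wcGo : List Char → Bool → Nat
  | [], _ => 0
  | c :: t, inw =>
    if PySem.Chars.isspace c then wcGo t false
    else (if inw then 0 else 1) + wcGo t true

-- split₀'s result length is the number of word starts
lemma split₀_go_length : ∀ (l cur : List Char) (acc : List (List Char)),
    (PySem.Chars.split₀.go l cur acc).length
      = acc.length + (if cur.isEmpty then 0 else 1) + wcGo l (!cur.isEmpty)
  | [], cur, acc => by
    by_cases h : cur.isEmpty <;> simp [PySem.Chars.split₀.go, wcGo, h]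
  | c :: t, cur, acc => by
    rw [PySem.Chars.split₀.go]
    by_cases hs : PySem.Chars.isspace c
    · by_cases h : cur.isEmpty <;>
        simp [hs, h, split₀_go_length t [] acc, split₀_go_length t [] (cur.reverse :: acc), wcGo]
    · by_cases h : cur.isEmpty <;>
        simp [hs, h, split₀_go_length t (c :: cur) acc, wcGo] <;> omega

lemma split₀_length (l : List Char) : (PySem.Chars.split₀ l).length = wcGo l false := by
  simpa using split₀_go_length l [] []

-- B's (word_count, in_word) loop counts word starts
lemma wc_foldl : ∀ (l : List Char) (wc : Int) (inw : Bool),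
    (l.foldl (fun (s : Int × Bool) c =>
        if PySem.Chars.isspace c then (s.1, false)
        else (if s.2 then s.1 else s.1 + 1, true)) (wc, inw)).1
      = wc + wcGo l inw
  | [], wc, inw => by simp [wcGo]
  | c :: t, wc, inw => by
    by_cases hs : PySem.Chars.isspace c
    · simp [hs, wcGo, wc_foldl t wc false]
    · cases inw <;> simp [hs, wcGo, wc_foldl t wc true, wc_foldl t (wc + 1) true] <;> omega

-- replacing " " with "" keeps exactly the non-space characters
lemma replace_go_space : ∀ (fuel : Nat) (l : List Char) (acc : List Char), l.length ≤ fuel →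
    PySem.Chars.replace.go [' '] [] fuel l acc = acc.reverse ++ l.filter (fun c => c ≠ ' ')
  | 0, l, acc, h => by
    have : l = [] := List.eq_nil_of_length_eq_zero (Nat.le_zero.mp h)
    subst this; simp [PySem.Chars.replace.go]
  | fuel + 1, [], acc, _ => by simp [PySem.Chars.replace.go]
  | fuel + 1, c :: t, acc, h => by
    rw [PySem.Chars.replace.go]
    have ht : t.length ≤ fuel := by simpa using h
    by_cases hc : c = ' '
    · subst hc
      simp [List.isPrefixOf, replace_go_space fuel t acc ht]
    · have hc' : ¬(' ' = c) := fun h => hc h.symm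
      simp [List.isPrefixOf, hc, hc', replace_go_space fuel t (c :: acc) ht]

lemma replace_space (l : List Char) :
    PySem.Chars.replace l [' '] [] = l.filter (fun c => c ≠ ' ') := by
  simpa using replace_go_space l.length l [] le_rfl

-- str.count of a single character is the character count
lemma count_go_singleton (c : Char) : ∀ (l : List Char) (fuel acc : Nat), l.length ≤ fuel →
    PySem.Chars.count.go [c] fuel l acc = acc + l.count c
  | [], fuel, acc, _ => by cases fuel <;> simp [PySem.Chars.count.go]
  | h :: t, fuel + 1, acc, hle => by
    rw [PySem.Chars.count.go]
    have ht : t.length ≤ fuel := by simpa using hle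
    by_cases hc : c = h
    · subst hc
      simp [List.isPrefixOf, count_go_singleton c t fuel (acc + 1) ht]
      omega
    · simp [List.isPrefixOf, hc, count_go_singleton c t fuel acc ht, Ne.symm hc]

lemma count_singleton (s : List Char) (c : Char) : PySem.Chars.count s [c] = s.count c := by
  simp [PySem.Chars.count, count_go_singleton c s s.length 0 le_rfl]

-- per character, summing the indicator over "parallelism" gives its weight
lemma per_char_weight (c : Char) :
    (SCORE_LETTERS.toList.map (fun k => if k = c then (1 : Int) else 0)).sum
      = PySem.Dict.getD PR_WEIGHTS c 0 := by
  have hA : SCORE_LETTERS.toList = ['p','a','r','a','l','l','e','l','i','s','m'] := by decide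
  have hItems : PR_WEIGHTS.items
      = [('p', 1), ('a', 2), ('r', 1), ('l', 3), ('e', 1), ('i', 1), ('s', 1), ('m', 1)] := by decide
  rw [hA]
  by_cases hp : c = 'p'; · subst hp; decide
  by_cases ha : c = 'a'; · subst ha; decide
  by_cases hr : c = 'r'; · subst hr; decide
  by_cases hl : c = 'l'; · subst hl; decide
  by_cases he : c = 'e'; · subst he; decide
  by_cases hi : c = 'i'; · subst hi; decide
  by_cases hs : c = 's'; · subst hs; decide
  by_cases hm : c = 'm'; · subst hm; decide
  simp [PySem.Dict.getD, PySem.Dict.get?, hItems,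
    Ne.symm hp, Ne.symm ha, Ne.symm hr, Ne.symm hl, Ne.symm he, Ne.symm hi, Ne.symm hs, Ne.symm hm]

-- A's eleven count scans sum to B's per-character weight sum
lemma score_swap : ∀ (l : List Char),
    (SCORE_LETTERS.toList.map (fun k => (l.count k : Int))).sum
      = (l.map (fun c => PySem.Dict.getD PR_WEIGHTS c 0)).sum
  | [] => by simp
  | c :: t => by
    have h1 : (SCORE_LETTERS.toList.map (fun k => ((c :: t).count k : Int))).sum
        = (SCORE_LETTERS.toList.map (fun k => (t.count k : Int))).sum
          + (SCORE_LETTERS.toList.map (fun k => if k = c then (1 : Int) else 0)).sum := by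
      rw [← PySem.List.sum_map_add_int]
      refine congrArg List.sum (List.map_congr_left fun k _ => ?_)
      by_cases hk : k = c
      · subst hk; push_cast [List.count_cons]; simp
      · have hk' : ¬(c = k) := fun h => hk h.symm
        simp [hk, hk']
    rw [h1, per_char_weight, score_swap t]
    simp; ring

-- ===== VERDICT (by name: the statement is the Claim_ definition above) =====
theorem process_record_spec : Claim_equal_process_record := by
  intro record _ hpre
  unfold Spec_process_record process_record process_record_alt
  obtain ⟨text, htext⟩ := Option.isSome_iff_exists.mp hpre
  rw [htext]
  simp only []
  rw [PySem.List.foldl_prod_mk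
      (f := fun (s : Int × Bool) c =>
        if PySem.Chars.isspace c then (s.1, false)
        else (if s.2 then s.1 else s.1 + 1, true))
      (g := fun (s : PySem.Set Char × Int) c =>
        ((if c ≠ ' ' then PySem.Set.add s.1 c else s.1),
          s.2 + PySem.Dict.getD PR_WEIGHTS c 0)),
    PySem.List.foldl_prod_mk
      (f := fun (s : PySem.Set Char) c => if c ≠ ' ' then PySem.Set.add s c else s)
      (g := fun (s : Int) c => s + PySem.Dict.getD PR_WEIGHTS c 0)]
  -- the three fields
  have hwc : ((PySem.Str.split₀ text).length : Int)
      = (text.toList.foldl (fun (s : Int × Bool) c =>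
          if PySem.Chars.isspace c then (s.1, false)
          else (if s.2 then s.1 else s.1 + 1, true)) ((0 : Int), false)).1 := by
    rw [wc_foldl, PySem.Str.split₀]
    simp [split₀_length]
  have hul : (PySem.Set.ofList (PySem.Str.replace text " " "").toList)
      = text.toList.foldl (fun (s : PySem.Set Char) c => if c ≠ ' ' then PySem.Set.add s c else s) [] := by
    rw [PySem.Str.toList_replace]
    have : (" " : String).toList = [' '] := by decide
    have h0 : ("" : String).toList = [] := by decide
    rw [this, h0, replace_space,
      PySem.List.foldl_ite_eq_foldl_filter (p := fun c => c ≠ ' ') PySem.Set.add text.toList []]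
    rw [PySem.Set.ofList_eq_foldl]
  have hsc : (SCORE_LETTERS.toList.map (fun c => (PySem.Str.count text (String.ofList [c]) : Int))).sum
      = text.toList.foldl (fun (s : Int) c => s + PySem.Dict.getD PR_WEIGHTS c 0) 0 := by
    rw [PySem.List.foldl_add text.toList (fun c => PySem.Dict.getD PR_WEIGHTS c 0) 0]
    have : ∀ k, PySem.Str.count text (String.ofList [k]) = text.toList.count k := by
      intro k
      simpa [PySem.Str.count] using count_singleton text.toList k
    simp only [this, score_swap text.toList, zero_add]
  simp only [hwc, hul, hsc]
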